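-- pv_equiv track=rewrite | github.com/AshokKota2005/DSA | 3142-check-if-grid-satisfies-conditions/3142-check-if-grid-satisfies-conditions.py | satisfiesConditions
-- ===== SOURCE A (Python) =====
-- from typing import List
--
-- def satisfiesConditions(grid: List[List[int]]) -> bool:
--     for i in range(0,len(grid)):
--         for j in range(0,len(grid[0])):
--             if 0 <= i+1 < len(grid) and 0 <= j < len(grid[0]):
--                 if grid[i][j]!= grid[i+1][j]:
--                     return False
--             if 0 <= i <= len(grid) and 0 <= j+1 < len(grid[0]):
--                 if grid[i][j] == grid[i][j+1]:
--                     return False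
--     return True
-- ===== SOURCE B (Python) =====
-- def satisfiesConditions(grid):
--     # The grid satisfies the conditions iff the first row has no equal adjacent
--     # pair and every row (restricted to the grid's width) is identical to the
--     # first row: vertical equality forces every row to copy row 0, and then
--     # horizontal distinctness of every row reduces to that of row 0 alone.
--     if not grid:
--         return True
--     first = grid[0]
--     n = len(first)
--     if any(first[j] == first[j + 1] for j in range(n - 1)):
--         return False
--     return all(row[:n] == first for row in grid[1:])
-- ===== Notes on version B (the rewrite author's own statement) =====
-- stated objective: alternative
-- what changed: Uses row 0 as the single reference: checks adjacent distinctness only in the first row (O(n) instead of per-row) and that every other row, cut to the grid's width, equals the first row, instead of A's fused per-cell scan of consecutive rows with bounds guards.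
-- crash fix: On ragged grids where A's row-major scan reaches a cell missing from a too-short row before any condition violation, A raises IndexError while B returns False (the short row cannot equal the first row). — e.g. on satisfiesConditions([[1, 2], [1]]): A raises IndexError, B returns false
import Mathlib
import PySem

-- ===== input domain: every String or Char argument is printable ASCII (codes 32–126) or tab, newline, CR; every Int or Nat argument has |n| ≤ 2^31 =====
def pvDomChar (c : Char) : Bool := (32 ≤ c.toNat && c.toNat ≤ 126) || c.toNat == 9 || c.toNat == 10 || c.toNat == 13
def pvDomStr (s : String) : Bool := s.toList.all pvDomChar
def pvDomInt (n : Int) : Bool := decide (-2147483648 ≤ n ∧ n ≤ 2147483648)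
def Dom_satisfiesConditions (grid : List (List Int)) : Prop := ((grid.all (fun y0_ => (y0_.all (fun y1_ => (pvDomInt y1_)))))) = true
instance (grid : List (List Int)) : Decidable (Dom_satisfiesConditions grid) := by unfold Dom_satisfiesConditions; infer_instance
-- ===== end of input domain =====

-- B uses row 0 as the single reference: adjacent distinctness is checked only in the first
-- row, and every other row (cut to the grid's width) must equal the first row — replacing
-- A's fused per-cell scan of consecutive rows with bounds guards.

-- ===== PORT A =====
-- transliteration of A's fused double loop; pyGetD is exact under Pre_ (every access A performs there is in range)
def satisfiesConditions (grid : List (List Int)) : Bool :=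
  (PySem.List.pyRange 0 (grid.length : Int) 1).all (fun i =>
    (PySem.List.pyRange 0 ((PySem.List.pyGetD grid 0 []).length : Int) 1).all (fun j =>
      (!(decide (0 ≤ i + 1 ∧ i + 1 < (grid.length : Int) ∧ 0 ≤ j ∧ j < ((PySem.List.pyGetD grid 0 []).length : Int))) ||
        (PySem.List.pyGetD (PySem.List.pyGetD grid i []) j 0 == PySem.List.pyGetD (PySem.List.pyGetD grid (i + 1) []) j 0)) &&
      (!(decide (0 ≤ i ∧ i ≤ (grid.length : Int) ∧ 0 ≤ j + 1 ∧ j + 1 < ((PySem.List.pyGetD grid 0 []).length : Int))) ||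
        (PySem.List.pyGetD (PySem.List.pyGetD grid i []) j 0 != PySem.List.pyGetD (PySem.List.pyGetD grid i []) (j + 1) 0))))

-- ===== PORT B =====
-- transliteration of Source B: 'if not grid' = match on []; first = grid[0]; n = len(first);
-- any(...) over range(n-1); row[:n] via PySem.List.slice; grid[1:] = grid.tail (exact)
def satisfiesConditions_alt (grid : List (List Int)) : Bool :=
  match grid with
  | [] => true
  | first :: _ =>
    let n : Int := (first.length : Int)
    if (PySem.List.pyRange 0 (n - 1) 1).any (fun j =>
        PySem.List.pyGetD first j 0 == PySem.List.pyGetD first (j + 1) 0) then false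
    else grid.tail.all (fun row => PySem.List.slice row none (some n) == first)

-- ===== PRECONDITION & SPEC =====
-- input-shape helpers for Pre_ (row i, cell (i,j), grid width = length of row 0)
def pvRow (grid : List (List Int)) (i : Nat) : List Int := grid.getD i []
def pvCell (grid : List (List Int)) (i j : Nat) : Int := (pvRow grid i).getD j 0
def pvWidth (grid : List (List Int)) : Nat := (grid.headD []).length

-- a violation of one of the two conditions that A's row-major scan meets before the first
-- missing cell of row k (rows before k all have full width, so every access here is in range)
def pvViol (grid : List (List Int)) (k : Nat) : Prop :=
  (∃ i < k - 1, ∃ j < pvWidth grid, pvCell grid i j ≠ pvCell grid (i + 1) j) ∨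
  (∃ i < k - 1, ∃ j < pvWidth grid - 1, pvCell grid i j = pvCell grid i (j + 1)) ∨
  (∃ j < (pvRow grid k).length, pvCell grid (k - 1) j ≠ pvCell grid k j) ∨
  (∃ j < (pvRow grid k).length, j + 1 < pvWidth grid ∧ pvCell grid (k - 1) j = pvCell grid (k - 1) (j + 1))

-- Pre_ is EXACTLY the set of inputs on which the Python A returns normally: grids whose rows all
-- reach the width of row 0 never raise; a grid whose first too-short row is row k raises IndexError
-- there unless A's scan meets a condition violation first (then it returns False before reaching it).
def Pre_satisfiesConditions (grid : List (List Int)) : Prop :=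
  (∀ row ∈ grid, pvWidth grid ≤ row.length) ∨
  (∃ k < grid.length, (pvRow grid k).length < pvWidth grid ∧
    (∀ i < k, pvWidth grid ≤ (pvRow grid i).length) ∧ pvViol grid k)
instance (grid : List (List Int)) : Decidable (Pre_satisfiesConditions grid) := by
  unfold Pre_satisfiesConditions pvViol; infer_instance

def pvWitness_satisfiesConditions : List (List Int) := [[1, 0, 2], [1, 0, 2]]

-- On ragged grids where A's scan reaches a missing cell before any condition violation, A raises
-- IndexError while B returns False (a short row cannot equal the first row).
def Raises_satisfiesConditions (grid : List (List Int)) : Prop :=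
  ∃ k < grid.length, (pvRow grid k).length < pvWidth grid ∧
    (∀ i < k, pvWidth grid ≤ (pvRow grid i).length) ∧ ¬ pvViol grid k
instance (grid : List (List Int)) : Decidable (Raises_satisfiesConditions grid) := by
  unfold Raises_satisfiesConditions pvViol; infer_instance
def pvRaiseWitness_satisfiesConditions : List (List Int) := [[1, 2], [1]]
def pvRaiseWitnessOut_satisfiesConditions : Bool := false

def Spec_satisfiesConditions (grid : List (List Int)) (out : Bool) : Prop := out = satisfiesConditions_alt grid
instance (grid : List (List Int)) (out : Bool) : Decidable (Spec_satisfiesConditions grid out) := by unfold Spec_satisfiesConditions; infer_instance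

-- ===== CLAIM (what is proved, stated in full; the proofs are below) =====
def Claim_equal_satisfiesConditions : Prop := ∀ (grid : List (List Int)), Dom_satisfiesConditions grid → Pre_satisfiesConditions grid → Spec_satisfiesConditions grid (satisfiesConditions grid)
def Claim_raises_satisfiesConditions : Prop := (∀ (grid : List (List Int)), Dom_satisfiesConditions grid → Raises_satisfiesConditions grid → ¬ Pre_satisfiesConditions grid) ∧ (Dom_satisfiesConditions (pvRaiseWitness_satisfiesConditions) ∧ Raises_satisfiesConditions (pvRaiseWitness_satisfiesConditions) ∧ satisfiesConditions_alt (pvRaiseWitness_satisfiesConditions) = pvRaiseWitnessOut_satisfiesConditions)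

-- ===== LEMMAS AND PROOFS =====

theorem pyGetD_zero_headD (grid : List (List Int)) :
    PySem.List.pyGetD grid 0 [] = grid.headD [] := by
  cases grid <;> simp [PySem.List.pyGetD_zero]

theorem width_row_zero (grid : List (List Int)) (h : grid ≠ []) :
    (pvRow grid 0).length = pvWidth grid := by
  cases grid with
  | nil => exact absurd rfl h
  | cons r t => simp [pvRow, pvWidth]

theorem cell_cast (grid : List (List Int)) (i j : Nat) :
    PySem.List.pyGetD (PySem.List.pyGetD grid (i : Int) []) (j : Int) 0 = pvCell grid i j := by
  simp [PySem.List.pyGetD_natCast, pvCell, pvRow]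

-- Int-indexed characterization of port A (direct unfolding)
theorem satisfiesConditions_eq_iff (grid : List (List Int)) :
    satisfiesConditions grid = true ↔
      ∀ i ∈ PySem.List.pyRange 0 (grid.length : Int) 1,
        ∀ j ∈ PySem.List.pyRange 0 ((PySem.List.pyGetD grid 0 []).length : Int) 1,
          ((0 ≤ i + 1 ∧ i + 1 < (grid.length : Int) ∧ 0 ≤ j ∧ j < ((PySem.List.pyGetD grid 0 []).length : Int)) →
            PySem.List.pyGetD (PySem.List.pyGetD grid i []) j 0 = PySem.List.pyGetD (PySem.List.pyGetD grid (i + 1) []) j 0) ∧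
          ((0 ≤ i ∧ i ≤ (grid.length : Int) ∧ 0 ≤ j + 1 ∧ j + 1 < ((PySem.List.pyGetD grid 0 []).length : Int)) →
            PySem.List.pyGetD (PySem.List.pyGetD grid i []) j 0 ≠ PySem.List.pyGetD (PySem.List.pyGetD grid i []) (j + 1) 0) := by
  simp [satisfiesConditions, List.all_eq_true, Decidable.imp_iff_not_or]

-- Nat-indexed characterization of port A
theorem portA_iff (grid : List (List Int)) :
    satisfiesConditions grid = true ↔
      ∀ i < grid.length, ∀ j < pvWidth grid,
        (i + 1 < grid.length → pvCell grid i j = pvCell grid (i + 1) j) ∧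
        (j + 1 < pvWidth grid → pvCell grid i j ≠ pvCell grid i (j + 1)) := by
  rw [satisfiesConditions_eq_iff]
  have hw : ((PySem.List.pyGetD grid 0 []).length : Int) = (pvWidth grid : Int) := by
    rw [pyGetD_zero_headD]; rfl
  constructor
  · intro h i hi j hj
    have h1 := h (i : Int) (by rw [PySem.List.mem_pyRange_one]; exact ⟨by positivity, by exact_mod_cast hi⟩)
      (j : Int) (by rw [PySem.List.mem_pyRange_one, hw]; exact ⟨by positivity, by exact_mod_cast hj⟩)
    constructor
    · intro him
      have h2 := h1.1 ⟨by positivity, by exact_mod_cast him, by positivity, by rw [hw]; exact_mod_cast hj⟩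
      rw [show ((i : Int) + 1) = ((i + 1 : Nat) : Int) by push_cast; ring,
        cell_cast, cell_cast] at h2
      exact h2
    · intro hjn
      have h2 := h1.2 ⟨by positivity, by exact_mod_cast Nat.le_of_lt hi, by positivity, by rw [hw]; exact_mod_cast hjn⟩
      rw [show ((j : Int) + 1) = ((j + 1 : Nat) : Int) by push_cast; ring,
        cell_cast, cell_cast] at h2
      exact h2
  · intro h i hi j hj
    rw [PySem.List.mem_pyRange_one] at hi
    rw [PySem.List.mem_pyRange_one, hw] at hj
    have hi' : i = ((i.toNat : Nat) : Int) := (Int.toNat_of_nonneg hi.1).symm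
    have hj' : j = ((j.toNat : Nat) : Int) := (Int.toNat_of_nonneg hj.1).symm
    have hi2 : i.toNat < grid.length := by omega
    have hj2 : j.toNat < pvWidth grid := by omega
    have h2 := h i.toNat hi2 j.toNat hj2
    constructor
    · rintro ⟨-, him, -, -⟩
      have h3 := h2.1 (by omega)
      rw [hi', hj', show (((i.toNat : Nat) : Int) + 1) = ((i.toNat + 1 : Nat) : Int) by push_cast; ring,
        cell_cast, cell_cast]
      exact h3
    · rintro ⟨-, -, -, hjn⟩
      rw [hw] at hjn
      have h3 := h2.2 (by omega)
      rw [hi', hj', show (((j.toNat : Nat) : Int) + 1) = ((j.toNat + 1 : Nat) : Int) by push_cast; ring,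
        cell_cast, cell_cast]
      exact h3

-- characterization of port B: first-row adjacent distinctness, and every row cut to the width equals row 0
theorem portB_iff (grid : List (List Int)) :
    satisfiesConditions_alt grid = true ↔
      (∀ j, j + 1 < pvWidth grid → pvCell grid 0 j ≠ pvCell grid 0 (j + 1)) ∧
      (∀ i < grid.length, (pvRow grid i).take (pvWidth grid) = pvRow grid 0) := by
  cases grid with
  | nil =>
    simp [satisfiesConditions_alt, pvWidth]
  | cons first rest =>
    have hweq : pvWidth (first :: rest) = first.length := rfl
    show (if _ then false else _) = true ↔ _
    simp only [Bool.if_false_left, Bool.and_eq_true, Bool.not_eq_eq_eq_not, Bool.not_true,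
      decide_eq_false_iff_not, List.any_eq_true, not_exists, not_and]
    constructor
    · rintro ⟨hno, hall⟩
      constructor
      · intro j hj
        have hjm : (j : Int) ∈ PySem.List.pyRange 0 ((first.length : Int) - 1) 1 := by
          rw [PySem.List.mem_pyRange_one]
          exact ⟨by positivity, by rw [hweq] at hj; omega⟩
        have h1 := hno _ hjm
        rw [show ((j : Int) + 1) = ((j + 1 : Nat) : Int) by push_cast; ring] at h1
        simp only [PySem.List.pyGetD_natCast, beq_iff_eq] at h1
        simpa [pvCell, pvRow] using h1
      · intro i hi
        cases i with
        | zero => simp [pvRow, hweq]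
        | succ i' =>
          rw [List.all_eq_true] at hall
          have hmem : (first :: rest).getD (i' + 1) [] ∈ rest := by
            simp only [List.getD_cons_succ]
            have hi' : i' < rest.length := by simpa using hi
            rw [List.getD_eq_getElem _ _ hi']
            exact List.getElem_mem hi'
          have h1 := hall _ (by simpa using hmem)
          rw [PySem.List.slice_to_natCast, beq_iff_eq] at h1
          simpa [pvRow, hweq] using h1
    · rintro ⟨hadj, hrows⟩
      constructor
      · intro j hjm
        rw [PySem.List.mem_pyRange_one] at hjm
        have hj' : j = ((j.toNat : Nat) : Int) := (Int.toNat_of_nonneg hjm.1).symm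
        have hjn : j.toNat + 1 < pvWidth (first :: rest) := by
          rw [hweq]; omega
        have h1 := hadj j.toNat hjn
        rw [hj', show (((j.toNat : Nat) : Int) + 1) = ((j.toNat + 1 : Nat) : Int) by push_cast; ring]
        simp only [PySem.List.pyGetD_natCast, beq_iff_eq]
        simpa [pvCell, pvRow] using h1
      · rw [List.all_eq_true]
        intro row hrow
        obtain ⟨i, hi, hieq⟩ := List.mem_iff_getElem.mp (by simpa using hrow)
        have h1 := hrows (i + 1) (by simpa using hi)
        rw [PySem.List.slice_to_natCast, beq_iff_eq]
        have hrowD : row = pvRow (first :: rest) (i + 1) := by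
          rw [pvRow, List.getD_cons_succ, List.getD_eq_getElem _ _ hi, hieq]
        rw [hrowD, ← hweq]
        simpa [pvRow] using h1

theorem portA_eq_false_of (grid : List (List Int)) (i j : Nat) (hi : i < grid.length)
    (hj : j < pvWidth grid)
    (hbad : ¬((i + 1 < grid.length → pvCell grid i j = pvCell grid (i + 1) j) ∧
              (j + 1 < pvWidth grid → pvCell grid i j ≠ pvCell grid i (j + 1)))) :
    satisfiesConditions grid = false := by
  cases h : satisfiesConditions grid with
  | false => rfl
  | true => exact absurd ((portA_iff grid).mp h i hi j hj) hbad

theorem portB_eq_false_of (grid : List (List Int)) (i : Nat) (hi : i < grid.length)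
    (hbad : (pvRow grid i).take (pvWidth grid) ≠ pvRow grid 0) :
    satisfiesConditions_alt grid = false := by
  cases h : satisfiesConditions_alt grid with
  | false => rfl
  | true => exact absurd (((portB_iff grid).mp h).2 i hi) hbad

theorem getD_take_int (l : List Int) (n j : Nat) (h : j < n) :
    (l.take n).getD j 0 = l.getD j 0 := by
  by_cases hl : j < l.length
  · rw [List.getD_eq_getElem _ _ (by simp [List.length_take]; omega), List.getD_eq_getElem _ _ hl]
    exact List.getElem_take
  · rw [List.getD_eq_default _ _ (by simp [List.length_take]; omega),
      List.getD_eq_default _ _ (by omega)]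

-- columnwise constancy propagates every cell down to row 0
theorem cell_eq_zero_of_vert (grid : List (List Int))
    (hv : ∀ i < grid.length, ∀ j < pvWidth grid,
      (i + 1 < grid.length → pvCell grid i j = pvCell grid (i + 1) j))
    (i : Nat) (hi : i < grid.length) (j : Nat) (hj : j < pvWidth grid) :
    pvCell grid i j = pvCell grid 0 j := by
  induction i with
  | zero => rfl
  | succ i' ih =>
    have h1 := hv i' (by omega) j hj hi
    rw [← h1]
    exact ih (by omega)

theorem main_eq (grid : List (List Int)) (hpre : Pre_satisfiesConditions grid) :
    satisfiesConditions grid = satisfiesConditions_alt grid := by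
  rcases hpre with hrect | ⟨k, hk, hshort, hlong, hviol⟩
  · -- every row reaches the width of row 0
    have hlen : ∀ i, i < grid.length → pvWidth grid ≤ (pvRow grid i).length := by
      intro i hi
      apply hrect
      rw [pvRow, List.getD_eq_getElem _ _ hi]
      exact List.getElem_mem hi
    rw [Bool.eq_iff_iff, portA_iff, portB_iff]
    constructor
    · intro h
      have hz := cell_eq_zero_of_vert grid (fun i hi j hj => (h i hi j hj).1)
      constructor
      · intro j hj
        rcases Nat.eq_zero_or_pos grid.length with h0 | h0
        · have hgn : grid = [] := List.eq_nil_of_length_eq_zero h0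
          subst hgn; simp [pvWidth] at hj
        · exact (h 0 h0 j (by omega)).2 hj
      · intro i hi
        have hz0 : (pvRow grid 0).length = pvWidth grid := by
          apply width_row_zero; intro e; subst e; simp at hi
        apply List.ext_getElem
        · rw [List.length_take]
          have := hlen i hi
          omega
        · intro t h1 h2
          have ht : t < pvWidth grid := by rw [List.length_take] at h1; omega
          have hc := hz i hi t ht
          have e1 : ((pvRow grid i).take (pvWidth grid)).getD t 0 = (pvRow grid 0).getD t 0 := by
            rw [getD_take_int _ _ _ ht]; exact hc
          rwa [List.getD_eq_getElem _ _ h1, List.getD_eq_getElem _ _ h2] at e1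
    · rintro ⟨hadj, hrows⟩ i hi j hj
      have hcz : ∀ i' < grid.length, ∀ j' < pvWidth grid, pvCell grid i' j' = pvCell grid 0 j' := by
        intro i' hi' j' hj'
        have h1 := hrows i' hi'
        have h2 : ((pvRow grid i').take (pvWidth grid)).getD j' 0 = (pvRow grid 0).getD j' 0 := by
          rw [h1]
        rwa [getD_take_int _ _ _ hj'] at h2
      constructor
      · intro him
        rw [hcz i hi j hj, hcz (i + 1) him j hj]
      · intro hjn
        rw [hcz i hi j hj, hcz i hi (j + 1) hjn]
        exact hadj j hjn
  · -- grid has a first short row k: A meets a violation (False) and B's cut of row k ≠ row 0 (False)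
    have hne : grid ≠ [] := by intro e; subst e; simp at hk
    have hk1 : 1 ≤ k := by
      by_contra h0
      have hk0 : k = 0 := by omega
      subst hk0
      have := width_row_zero grid hne
      omega
    have hBf : satisfiesConditions_alt grid = false := by
      apply portB_eq_false_of grid k hk
      intro he
      have h2 := congrArg List.length he
      rw [List.length_take, width_row_zero grid hne] at h2
      omega
    rw [hBf]
    rcases hviol with ⟨i, hik, j, hjn, hcell⟩ | ⟨i, hik, j, hjn, hcell⟩ |
      ⟨j, hjL, hcell⟩ | ⟨j, hjL, hjn, hcell⟩
    · exact portA_eq_false_of grid i j (by omega) hjn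
        (by intro hc; exact hcell (hc.1 (by omega)))
    · exact portA_eq_false_of grid i j (by omega) (by omega)
        (by intro hc; exact hc.2 (by omega) hcell)
    · refine portA_eq_false_of grid (k - 1) j (by omega) (by omega) ?_
      intro hc
      apply hcell
      have h3 := hc.1 (by omega)
      rwa [show k - 1 + 1 = k by omega] at h3
    · exact portA_eq_false_of grid (k - 1) j (by omega) (by omega)
        (by intro hc; exact hc.2 hjn hcell)

theorem raises_not_pre (grid : List (List Int)) (hr : Raises_satisfiesConditions grid) :
    ¬ Pre_satisfiesConditions grid := by
  obtain ⟨k, hk, hshort, hlong, hnov⟩ := hr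
  rintro (hrect | ⟨k', hk', hshort', hlong', hviol'⟩)
  · exact absurd (hrect (pvRow grid k) (by
      rw [pvRow, List.getD_eq_getElem _ _ hk]; exact List.getElem_mem hk)) (by omega)
  · have hkk : k = k' := by
      rcases Nat.lt_trichotomy k k' with h | h | h
      · exact absurd (hlong' k h) (by omega)
      · exact h
      · exact absurd (hlong k' h) (by omega)
    subst hkk
    exact hnov hviol'

-- ===== VERDICT =====
theorem satisfiesConditions_spec : Claim_equal_satisfiesConditions := by
  intro grid _ hpre
  unfold Spec_satisfiesConditions
  exact main_eq grid hpre

def satisfiesConditions_raises : Claim_raises_satisfiesConditions := by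
  unfold Claim_raises_satisfiesConditions
  exact ⟨fun grid _ => raises_not_pre grid, by decide⟩
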